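-- pv_equiv track=rewrite | github.com/acconeer/acconeer-python-exploration | src/acconeer/exptool/a121/_core/utils.py | transpose_extended_structures
-- ===== SOURCE A (Python) =====
-- import itertools
-- from typing import (
--     Any,
--     Callable,
--     Generic,
--     Iterator,
--     Optional,
--     Tuple,
--     Type,
--     TypeVar,
--     Union,
--     overload,
-- )
--
-- T = TypeVar("T")
--
-- KeyT = TypeVar("KeyT")
--
-- ValueT = TypeVar("ValueT")
--
-- def map_over_extended_structure(
--     func: Callable[[ValueT], T], structure: list[dict[KeyT, ValueT]]
-- ) -> list[dict[KeyT, T]]: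
--     """Applies a function, `func`, to each element of the extended structure.
--
--     Example:
--
--         structure = [{1: "one"}, {2: "two"}]        # KeyT = int, ValueT = str
--         func = str.encode                           # ValueT = str, T = bytes
--
--         # Result
--         result = [{1: b"one"}, {2: b"two"}]         # KeyT = int, T = bytes
--
--     """
--     return [{k: func(v) for k, v in d.items()} for d in structure]
--
-- def iterate_extended_structure(
--     structure: list[dict[int, ValueT]]
-- ) -> Iterator[Tuple[int, int, ValueT]]:
--     """Iterates over the elements of the extended structure.
--
--     :returns: Iterator of (<group id>, <sensor id>, <element>)
--     """
--
--     for group_id, group in enumerate(structure):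
--         for sensor_id, elem in group.items():
--             yield (group_id, sensor_id, elem)
--
-- def extended_structure_shape(structure: list[dict[int, Any]]) -> list[set[int]]:
--     return [set(group.keys()) for group in structure]
--
-- def transpose_extended_structures(
--     structures: list[list[dict[int, ValueT]]]
-- ) -> list[dict[int, list[ValueT]]]:
--     """'Transposes' a list of extended structures to create an extended structure of lists"""
--
--     if not structures:
--         raise ValueError("'structures' cannot be empty")
--
--     shapes = [extended_structure_shape(s) for s in structures]
--     if not all(shape == shapes[0] for shape in shapes):
--         raise ValueError("All extended structures needs to have the same structure.")
--
--     product: list[dict[int, list[ValueT]]] = map_over_extended_structure(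
--         lambda _: list(), structures[0]
--     )
--
--     for group_idx, sensor_id, value in itertools.chain(
--         *[iterate_extended_structure(es) for es in structures]
--     ):
--         product[group_idx][sensor_id].append(value)
--
--     return product
-- ===== SOURCE B (Python) =====
-- def extended_structure_shape(structure):
--     return [set(group.keys()) for group in structure]
--
--
-- def transpose_extended_structures(structures):
--     """'Transposes' a list of extended structures to create an extended structure of lists"""
--
--     if not structures:
--         raise ValueError("'structures' cannot be empty")
--
--     shapes = [extended_structure_shape(s) for s in structures]
--     if not all(shape == shapes[0] for shape in shapes):
--         raise ValueError("All extended structures needs to have the same structure.")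
--
--     return [
--         {sensor_id: [s[group_idx][sensor_id] for s in structures] for sensor_id in group}
--         for group_idx, group in enumerate(structures[0])
--     ]
-- ===== Notes on version B (the rewrite author's own statement) =====
-- stated objective: simpler
-- what changed: Instead of building an empty-list skeleton and appending cell by cell while iterating structures-outermost, B builds the result directly with a cell-outer comprehension: for each group/sensor of structures[0] it gathers [s[group_idx][sensor_id] for s in structures]; no mutable accumulator, inverted loop nesting.
import Mathlib
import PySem

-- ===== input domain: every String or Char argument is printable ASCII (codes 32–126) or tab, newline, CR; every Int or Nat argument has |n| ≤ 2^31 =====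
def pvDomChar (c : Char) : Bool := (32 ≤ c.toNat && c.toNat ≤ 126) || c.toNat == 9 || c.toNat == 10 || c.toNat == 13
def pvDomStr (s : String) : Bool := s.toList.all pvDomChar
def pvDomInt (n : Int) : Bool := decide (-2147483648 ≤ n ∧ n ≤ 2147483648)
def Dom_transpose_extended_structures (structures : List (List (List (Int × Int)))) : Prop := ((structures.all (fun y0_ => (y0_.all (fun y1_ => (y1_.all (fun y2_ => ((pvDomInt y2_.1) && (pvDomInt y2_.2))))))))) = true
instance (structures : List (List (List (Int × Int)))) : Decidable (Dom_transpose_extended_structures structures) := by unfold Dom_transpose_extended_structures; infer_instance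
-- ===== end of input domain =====

-- B rebuilds the result directly (cell-outer gathering comprehension) instead of A's
-- skeleton-then-append pass over all structures; same values, no mutable accumulator (objective: simpler).

-- ===== PORT A =====
-- helper: extended_structure_shape(structure) = [set(group.keys()) for group in structure]
def pvShape (es : List (List (Int × Int))) : List (PySem.Set Int) :=
  es.map (fun g => PySem.Set.ofList (PySem.Dict.ofList g).keys)

-- Python list '==' on two lists of sets: equal lengths and elementwise set equality
def pvShapeEq (a b : List (PySem.Set Int)) : Bool :=
  a.length == b.length && (a.zip b).all (fun p => PySem.Set.equal p.1 p.2)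

-- helper: map_over_extended_structure(func, structure), specialised to func : Int → List Int
def pvMapOver (f : Int → List Int) (structure_ : List (List (Int × Int))) : List (PySem.Dict Int (List Int)) :=
  structure_.map (fun g => PySem.Dict.ofList ((PySem.Dict.ofList g).items.map (fun kv => (kv.1, f kv.2))))

-- helper: list(iterate_extended_structure(structure)) — triples (group_id, sensor_id, elem)
def pvIterate (structure_ : List (List (Int × Int))) : List (Int × Int × Int) :=
  (PySem.List.enumerate structure_ 0).flatMap
    (fun p => (PySem.Dict.ofList p.2).items.map (fun kv => (p.1, kv.1, kv.2)))

def transpose_extended_structures (structures : List (List (List (Int × Int)))) : List (List (Int × List Int)) :=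
  if structures = [] then []  -- Python: raise ValueError (excluded by Pre_)
  else if !((structures.map pvShape).all
      (fun sh => pvShapeEq sh ((structures.map pvShape).headD []))) then []  -- Python: raise ValueError (excluded by Pre_)
  else
    -- product = map_over_extended_structure(lambda _: list(), structures[0]);
    -- then: for group_idx, sensor_id, value in itertools.chain(*[iterate_extended_structure(es) for es in structures]):
    --   product[group_idx][sensor_id].append(value)
    -- (group_idx comes from enumerate(…, 0), hence is ≥ 0: .toNat is the exact list index)
    ((structures.map pvIterate).flatten.foldl (fun prod t =>
        prod.set t.1.toNat
          ((prod.getD t.1.toNat PySem.Dict.empty).modify t.2.1 [] (fun l => l ++ [t.2.2])))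
      (pvMapOver (fun _ => []) (structures.headD []))).map (fun d => d.items)

-- ===== PORT B =====
def transpose_extended_structures_alt (structures : List (List (List (Int × Int)))) : List (List (Int × List Int)) :=
  if structures = [] then []  -- Python: raise ValueError (excluded by Pre_)
  else if !((structures.map pvShape).all
      (fun sh => pvShapeEq sh ((structures.map pvShape).headD []))) then []  -- Python: raise ValueError (excluded by Pre_)
  else
    -- [{sid: [s[gi][sid] for s in structures] for sid in group} for gi, group in enumerate(structures[0])]
    (PySem.List.enumerate (structures.headD []) 0).map (fun p =>
      (PySem.Dict.ofList p.2).keys.map (fun sid =>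
        (sid, structures.map (fun s => (PySem.Dict.ofList (PySem.List.pyGetD s p.1 [])).getD sid 0))))

-- ===== PRECONDITION & SPEC =====
-- Pre_ excludes exactly the inputs where A raises ValueError: an empty list of structures,
-- or structures whose shapes (per-group key sets) are not all equal.
def Pre_transpose_extended_structures (structures : List (List (List (Int × Int)))) : Prop :=
  structures ≠ [] ∧
    (structures.map pvShape).all
      (fun sh => pvShapeEq sh ((structures.map pvShape).headD [])) = true

instance (structures : List (List (List (Int × Int)))) : Decidable (Pre_transpose_extended_structures structures) := by
  unfold Pre_transpose_extended_structures; infer_instance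

def pvWitness_transpose_extended_structures : (List (List (List (Int × Int)))) :=
  [[[(1, 10), (2, 20)], [(3, 30)]], [[(2, 11), (1, 21)], [(3, 31)]]]

def Spec_transpose_extended_structures (structures : List (List (List (Int × Int)))) (out : List (List (Int × List Int))) : Prop := out = transpose_extended_structures_alt structures
instance (structures : List (List (List (Int × Int)))) (out : List (List (Int × List Int))) : Decidable (Spec_transpose_extended_structures structures out) := by unfold Spec_transpose_extended_structures; infer_instance

-- ===== CLAIM (what is proved, stated in full; the proofs are below) =====
def Claim_equal_transpose_extended_structures : Prop := ∀ (structures : List (List (List (Int × Int)))), Dom_transpose_extended_structures structures → Pre_transpose_extended_structures structures → Spec_transpose_extended_structures structures (transpose_extended_structures structures)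

-- ===== LEMMAS AND PROOFS =====

-- a dict built from pairs with distinct keys has exactly those pairs as items
theorem pv_items_ofList {ν : Type} (ps : List (Int × ν)) (h : (ps.map Prod.fst).Nodup) :
    (PySem.Dict.ofList ps).items = ps := by
  have := PySem.Dict.items_foldl_insert_fresh ps Prod.fst Prod.snd PySem.Dict.empty
      (fun a _ => by simp [PySem.Dict.contains_empty]) h
  simpa [PySem.Dict.ofList, PySem.Dict.update] using this

-- filtering a nodup-keyed dict's items at one key
theorem pv_filter_items (d : PySem.Dict Int Int) (c : Int) (hnd : d.keys.Nodup) :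
    ((d.items.filter (fun kv => kv.1 == c)).map (fun kv => kv.2))
      = if c ∈ d.keys then [d.getD c 0] else [] := by
  rw [PySem.Dict.items_eq_map_keys d hnd 0, List.filter_map]
  have hcomp : ((fun kv : Int × Int => kv.1 == c) ∘ fun k => (k, d.getD k 0)) = fun k => k == c := rfl
  rw [hcomp, List.filter_beq]
  by_cases hc : c ∈ d.keys
  · rw [List.count_eq_one_of_mem hnd hc, if_pos hc]
    simp
  · rw [List.count_eq_zero_of_not_mem hc, if_neg hc]
    simp

-- enumerate(xs, a) only produces indices ≥ a
theorem pv_enum_fst_nonneg {α : Type} (xs : List α) (a : Int) :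
    ∀ p ∈ PySem.List.enumerate xs a, a ≤ p.1 := by
  induction xs generalizing a with
  | nil => simp [PySem.List.enumerate]
  | cons x t ih =>
    intro p hp
    rw [PySem.List.enumerate_cons] at hp
    rcases List.mem_cons.mp hp with hp | hp
    · simp [hp]
    · have := ih (a + 1) p hp; omega

-- the append loop preserves the length of product
theorem pv_fold_length (ts : List (Int × Int × Int)) (prod : List (PySem.Dict Int (List Int))) :
    (ts.foldl (fun prod t =>
        prod.set t.1.toNat
          ((prod.getD t.1.toNat PySem.Dict.empty).modify t.2.1 [] (fun l => l ++ [t.2.2]))) prod).length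
      = prod.length := by
  induction ts generalizing prod with
  | nil => rfl
  | cons t ts ih => rw [List.foldl_cons, ih, List.length_set]

theorem pv_getD_set {α : Type} (l : List α) (i j : Nat) (a d : α) (hj : j < l.length) :
    (l.set i a).getD j d = if i = j then a else l.getD j d := by
  simp only [List.getD_eq_getElem?_getD, List.getElem?_set]
  by_cases h : i = j
  · subst h
    simp [Nat.lt_of_lt_of_le hj (le_refl _)]
  · simp [h]

-- slot projection of the append loop: what lands in product[j] is the fold of the triples with index j
theorem pv_fold_slot (ts : List (Int × Int × Int)) (prod : List (PySem.Dict Int (List Int)))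
    (j : Nat) (hj : j < prod.length) (hnn : ∀ t ∈ ts, 0 ≤ t.1) :
    (ts.foldl (fun prod t =>
        prod.set t.1.toNat
          ((prod.getD t.1.toNat PySem.Dict.empty).modify t.2.1 [] (fun l => l ++ [t.2.2]))) prod).getD j PySem.Dict.empty
      = ((ts.filter (fun t => t.1 == (j : Int))).map (fun t => (t.2.1, t.2.2))).foldl
          (fun d p => d.modify p.1 [] (fun l => l ++ [p.2])) (prod.getD j PySem.Dict.empty) := by
  induction ts generalizing prod with
  | nil => rfl
  | cons t ts ih =>
    have h0 : 0 ≤ t.1 := hnn t (by simp)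
    have hj' : j < (prod.set t.1.toNat
        ((prod.getD t.1.toNat PySem.Dict.empty).modify t.2.1 [] (fun l => l ++ [t.2.2]))).length := by
      simpa [List.length_set] using hj
    rw [List.foldl_cons, ih _ hj' (fun u hu => hnn u (List.mem_cons_of_mem _ hu))]
    by_cases hc : t.1 = (j : Int)
    · have htn : t.1.toNat = j := by omega
      rw [htn, pv_getD_set _ _ _ _ _ hj, if_pos rfl]
      simp [hc]
    · have htn : t.1.toNat ≠ j := by omega
      rw [pv_getD_set _ _ _ _ _ hj, if_neg htn]
      simp [hc]

-- contribution of one enumerated structure to the triples with a fixed group index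
theorem pv_enum_flatMap_if {β : Type} (G : List (Int × Int) → List β) :
    ∀ (s : List (List (Int × Int))) (a j : Int),
      (PySem.List.enumerate s a).flatMap (fun p => if p.1 == j then G p.2 else [])
        = if a ≤ j ∧ j < a + s.length then G (s.getD (j - a).toNat []) else [] := by
  intro s
  induction s with
  | nil =>
    intro a j
    rw [if_neg (by rintro ⟨h1, h2⟩; simp only [List.length_nil, Nat.cast_zero] at h2; omega)]
    rfl
  | cons x t ih =>
    intro a j
    rw [PySem.List.enumerate_cons, List.flatMap_cons, ih (a + 1) j]
    by_cases hc : a = j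
    · subst hc
      rw [if_pos (beq_self_eq_true a),
        if_neg (show ¬(a + 1 ≤ a ∧ a < a + 1 + ↑t.length) by rintro ⟨h1, -⟩; omega),
        if_pos (show a ≤ a ∧ a < a + ↑(x :: t).length by simp only [List.length_cons]; omega)]
      simp
    · rw [if_neg (show ¬((a == j) = true) by simp [hc])]
      rw [List.nil_append]
      by_cases h2 : a + 1 ≤ j ∧ j < a + 1 + ↑t.length
      · rw [if_pos h2,
          if_pos (show a ≤ j ∧ j < a + ↑(x :: t).length by simp only [List.length_cons]; omega)]
        have hidx : (j - a).toNat = (j - (a + 1)).toNat + 1 := by omega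
        rw [hidx, List.getD_cons_succ]
      · rw [if_neg h2,
          if_neg (show ¬(a ≤ j ∧ j < a + ↑(x :: t).length) by simp only [List.length_cons]; omega)]

theorem pv_set_equal_mem (s t : PySem.Set Int) (h : PySem.Set.equal s t = true) (c : Int) :
    c ∈ s ↔ c ∈ t := by
  simp only [PySem.Set.equal, PySem.Set.issubset, PySem.Set.contains, Bool.and_eq_true,
    List.all_eq_true, List.contains_iff_mem] at h
  exact ⟨fun hc => h.1 c hc, fun hc => h.2 c hc⟩

theorem pv_update_self (s : PySem.Set Int) (xs : List Int) (h : ∀ x ∈ xs, x ∈ s) :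
    PySem.Set.update s xs = s := by
  induction xs with
  | nil => rfl
  | cons x t ih =>
    have hx : PySem.Set.add s x = s := by
      simp [PySem.Set.add, PySem.Set.contains, h x (by simp)]
    simp only [PySem.Set.update, List.foldl_cons, hx] at *
    exact ih (fun y hy => h y (by simp [hy]))

theorem pv_flatMap_single {α β : Type} (l : List α) (f : α → β) :
    l.flatMap (fun x => [f x]) = l.map f := by
  induction l with
  | nil => rfl
  | cons x t ih => simp [ih]

-- shape equality unpacked: equal lengths and equal per-group key sets
theorem pv_shape_facts (s s0 : List (List (Int × Int)))
    (h : pvShapeEq (pvShape s) (pvShape s0) = true) :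
    s.length = s0.length ∧
      ∀ (jn : Nat), jn < s0.length → ∀ c : Int,
        (c ∈ (PySem.Dict.ofList (s.getD jn [])).keys ↔ c ∈ (PySem.Dict.ofList (s0.getD jn [])).keys) := by
  unfold pvShapeEq at h
  rw [Bool.and_eq_true, beq_iff_eq] at h
  obtain ⟨hl, hall⟩ := h
  have hlen : s.length = s0.length := by simpa [pvShape] using hl
  refine ⟨hlen, ?_⟩
  intro jn hj c
  have hjz : jn < ((pvShape s).zip (pvShape s0)).length := by
    simp [pvShape, List.length_zip]
    omega
  have hmem := List.all_eq_true.mp hall _ (List.getElem_mem hjz)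
  rw [List.getElem_zip] at hmem
  simp only [pvShape, List.getElem_map] at hmem
  have hiff := pv_set_equal_mem _ _ hmem c
  rw [PySem.Set.mem_ofList, PySem.Set.mem_ofList] at hiff
  have e1 : s.getD jn [] = s[jn]'(by omega) := by
    rw [List.getD_eq_getElem?_getD, List.getElem?_eq_getElem (by omega)]
    rfl
  have e2 : s0.getD jn [] = s0[jn]'(by omega) := by
    rw [List.getD_eq_getElem?_getD, List.getElem?_eq_getElem (by omega)]
    rfl
  rw [e1, e2]
  exact hiff


-- the triples of the chained iteration restricted to group index jn are exactly the
-- concatenation of the structures' group-jn dict items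
theorem pv_pairs (structures : List (List (List (Int × Int)))) (jn : Nat)
    (hlen : ∀ s ∈ structures, jn < s.length) :
    ((((structures.map pvIterate).flatten).filter (fun t => t.1 == (jn : Int))).map
        (fun t => (t.2.1, t.2.2)))
      = structures.flatMap (fun s => (PySem.Dict.ofList (s.getD jn [])).items) := by
  rw [← List.flatMap_def, List.filter_flatMap, List.map_flatMap]
  rw [List.flatMap_def, List.flatMap_def]
  congr 1
  apply List.map_congr_left
  intro s hs
  unfold pvIterate
  rw [List.filter_flatMap, List.map_flatMap]
  have hper : ∀ p : Int × List (Int × Int),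
      ((((PySem.Dict.ofList p.2).items.map (fun kv => (p.1, kv.1, kv.2))).filter
          (fun t => t.1 == (jn : Int))).map (fun t => (t.2.1, t.2.2)))
        = if p.1 == (jn : Int) then (PySem.Dict.ofList p.2).items else [] := by
    intro p
    rw [List.filter_map]
    by_cases hc : p.1 = (jn : Int)
    · have hcomp : ((fun t : Int × Int × Int => t.1 == (jn : Int)) ∘
          fun kv : Int × Int => (p.1, kv.1, kv.2)) = fun _ => true := by
        funext kv; simp [hc]
      rw [hcomp, List.filter_true, if_pos (by simp [hc]), List.map_map]
      simp
    · have hcomp : ((fun t : Int × Int × Int => t.1 == (jn : Int)) ∘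
          fun kv : Int × Int => (p.1, kv.1, kv.2)) = fun _ => false := by
        funext kv; simp [hc]
      rw [hcomp, List.filter_false, if_neg (by simp [hc])]
      simp
  have hcong : ((PySem.List.enumerate s 0).flatMap (fun p =>
        (((PySem.Dict.ofList p.2).items.map (fun kv => (p.1, kv.1, kv.2))).filter
            (fun t => t.1 == (jn : Int))).map (fun t => (t.2.1, t.2.2))))
      = (PySem.List.enumerate s 0).flatMap (fun p =>
          if p.1 == (jn : Int) then (PySem.Dict.ofList p.2).items else []) := by
    rw [List.flatMap_def, List.flatMap_def]
    congr 1
    exact List.map_congr_left (fun p _ => hper p)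
  rw [hcong, pv_enum_flatMap_if (fun g => (PySem.Dict.ofList g).items) s 0 (jn : Int)]
  rw [if_pos ⟨by omega, by have := hlen s hs; omega⟩]
  simp

-- the content of slot jn of the finished product, as B computes it
theorem pv_slot_items (structures : List (List (List (Int × Int))))
    (s0 : List (List (Int × Int))) (jn : Nat) (hjn : jn < s0.length)
    (hLen : ∀ s ∈ structures, s.length = s0.length)
    (hKeys : ∀ s ∈ structures, ∀ c : Int,
      (c ∈ (PySem.Dict.ofList (s.getD jn [])).keys ↔ c ∈ (PySem.Dict.ofList (s0.getD jn [])).keys)) :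
    (((structures.map pvIterate).flatten.foldl (fun prod t =>
        prod.set t.1.toNat
          ((prod.getD t.1.toNat PySem.Dict.empty).modify t.2.1 [] (fun l => l ++ [t.2.2])))
      (pvMapOver (fun _ => []) s0)).getD jn PySem.Dict.empty).items
      = (PySem.Dict.ofList (s0.getD jn [])).keys.map
          (fun c => (c, structures.map (fun s => (PySem.Dict.ofList (s.getD jn [])).getD c 0))) := by
  have hLprod : (pvMapOver (fun _ => []) s0).length = s0.length := by simp [pvMapOver]
  have hnn : ∀ t ∈ (structures.map pvIterate).flatten, (0 : Int) ≤ t.1 := by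
    intro t ht
    rw [List.mem_flatten] at ht
    obtain ⟨l, hl, htl⟩ := ht
    rw [List.mem_map] at hl
    obtain ⟨s, hs, rfl⟩ := hl
    unfold pvIterate at htl
    rw [List.mem_flatMap] at htl
    obtain ⟨p, hp, ht2⟩ := htl
    rw [List.mem_map] at ht2
    obtain ⟨kv, _, rfl⟩ := ht2
    exact pv_enum_fst_nonneg s 0 p hp
  rw [pv_fold_slot _ _ jn (by rw [hLprod]; exact hjn) hnn]
  rw [pv_pairs structures jn (fun s hs => by rw [hLen s hs]; exact hjn)]
  -- the skeleton at slot jn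
  have e0 : s0.getD jn [] = s0[jn] := by
    rw [List.getD_eq_getElem?_getD, List.getElem?_eq_getElem hjn]; rfl
  have hskel : (pvMapOver (fun _ => []) s0).getD jn PySem.Dict.empty
      = PySem.Dict.ofList (((PySem.Dict.ofList (s0.getD jn [])).items).map
          (fun kv => (kv.1, ([] : List Int)))) := by
    unfold pvMapOver
    rw [List.getD_eq_getElem?_getD, List.getElem?_eq_getElem (by simpa using hjn)]
    rw [Option.getD_some, List.getElem_map, e0]
  rw [hskel]
  have hnd0 : (PySem.Dict.ofList (s0.getD jn [])).keys.Nodup := PySem.Dict.nodup_keys_ofList _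
  have hfst : (((PySem.Dict.ofList (s0.getD jn [])).items).map
      (fun kv => (kv.1, ([] : List Int)))).map Prod.fst = (PySem.Dict.ofList (s0.getD jn [])).keys := by
    rw [List.map_map]; rfl
  have hskelitems := pv_items_ofList (((PySem.Dict.ofList (s0.getD jn [])).items).map
      (fun kv => (kv.1, ([] : List Int)))) (by rw [hfst]; exact hnd0)
  have hskelkeys : (PySem.Dict.ofList (((PySem.Dict.ofList (s0.getD jn [])).items).map
      (fun kv => (kv.1, ([] : List Int))))).keys = (PySem.Dict.ofList (s0.getD jn [])).keys := by
    rw [← hfst]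
    rw [show ∀ d : PySem.Dict Int (List Int), d.keys = d.items.map Prod.fst from fun _ => rfl]
    rw [hskelitems]
  set P := structures.flatMap (fun s => (PySem.Dict.ofList (s.getD jn [])).items) with hP
  set skel := PySem.Dict.ofList (((PySem.Dict.ofList (s0.getD jn [])).items).map
      (fun kv => (kv.1, ([] : List Int)))) with hskeldef
  have hPmem : ∀ x ∈ P.map Prod.fst, x ∈ skel.keys := by
    intro x hx
    rw [hskelkeys]
    rw [List.map_flatMap] at hx
    rw [List.mem_flatMap] at hx
    obtain ⟨s, hs, hxs⟩ := hx
    exact (hKeys s hs x).mp hxs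
  have hkeys2 : (P.foldl (fun d p => d.modify p.1 [] (fun l => l ++ [p.2])) skel).keys
      = PySem.Set.update skel.keys (P.map Prod.fst) :=
    PySem.Dict.keys_foldl_modify_key (l := P) (key := Prod.fst)
      (d0 := ([] : List Int)) (f := fun _ p => fun l => l ++ [p.2]) (d := skel)
  have hkeysfin : (P.foldl (fun d p => d.modify p.1 [] (fun l => l ++ [p.2])) skel).keys
      = (PySem.Dict.ofList (s0.getD jn [])).keys := by
    rw [hkeys2, pv_update_self _ _ hPmem, hskelkeys]
  have hsnodup : skel.keys.Nodup := by
    rw [hskeldef]; exact PySem.Dict.nodup_keys_ofList _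
  have hval : ∀ c ∈ (PySem.Dict.ofList (s0.getD jn [])).keys,
      (P.foldl (fun d p => d.modify p.1 [] (fun l => l ++ [p.2])) skel).getD c []
        = structures.map (fun s => (PySem.Dict.ofList (s.getD jn [])).getD c 0) := by
    intro c hc
    rw [PySem.Dict.getD_foldl_modify_append]
    have hskl : skel.getD c [] = [] := by
      have hmemit : (c, ([] : List Int)) ∈ skel.items := by
        rw [hskeldef, hskelitems, List.mem_map]
        obtain ⟨kv, hkv, hkvc⟩ :=
          List.mem_map.mp (show c ∈ (PySem.Dict.ofList (s0.getD jn [])).items.map Prod.fst from hc)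
        exact ⟨kv, hkv, by rw [hkvc]⟩
      exact PySem.Dict.getD_of_mem_items skel hmemit hsnodup []
    rw [hskl, List.nil_append, hP, List.filter_flatMap, List.map_flatMap]
    have hper : ∀ s ∈ structures,
        (((PySem.Dict.ofList (s.getD jn [])).items.filter (fun kv => kv.1 == c)).map
            (fun kv => kv.2))
          = [(PySem.Dict.ofList (s.getD jn [])).getD c 0] := by
      intro s hs
      rw [pv_filter_items _ c (PySem.Dict.nodup_keys_ofList _), if_pos ((hKeys s hs c).mpr hc)]
    calc structures.flatMap (fun s =>
            ((PySem.Dict.ofList (s.getD jn [])).items.filter (fun kv => kv.1 == c)).map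
              (fun kv => kv.2))
        = structures.flatMap (fun s => [(PySem.Dict.ofList (s.getD jn [])).getD c 0]) := by
          rw [List.flatMap_def, List.flatMap_def]
          congr 1
          exact List.map_congr_left hper
      _ = _ := pv_flatMap_single structures _
  rw [PySem.Dict.items_eq_map_keys _ (by rw [hkeysfin]; exact hnd0) ([] : List Int), hkeysfin]
  apply List.map_congr_left
  intro c hc
  rw [hval c hc]

-- ===== VERDICT (by name: the statement is the Claim_ definition above) =====
theorem transpose_extended_structures_spec : Claim_equal_transpose_extended_structures := by
  intro structures _ hpre
  obtain ⟨hne, hsh⟩ := hpre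
  unfold Spec_transpose_extended_structures
  cases structures with
  | nil => exact absurd rfl hne
  | cons s0 rest =>
  have hh : (((s0 :: rest).map pvShape).headD []) = pvShape s0 := by simp
  rw [hh] at hsh
  have hShapes : ∀ s ∈ s0 :: rest, pvShapeEq (pvShape s) (pvShape s0) = true := by
    intro s hs
    exact List.all_eq_true.mp hsh (pvShape s) (List.mem_map.mpr ⟨s, hs, rfl⟩)
  have hLen : ∀ s ∈ s0 :: rest, s.length = s0.length :=
    fun s hs => (pv_shape_facts s s0 (hShapes s hs)).1
  unfold transpose_extended_structures transpose_extended_structures_alt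
  rw [if_neg (List.cons_ne_nil s0 rest), if_neg (List.cons_ne_nil s0 rest)]
  rw [hh, hsh]
  simp only [Bool.not_true, Bool.false_eq_true, if_false, List.headD_cons]
  apply List.ext_getElem
  · rw [List.length_map, List.length_map, pv_fold_length, PySem.List.length_enumerate]
    simp [pvMapOver]
  intro jn h1 h2
  have hjn : jn < s0.length := by
    simpa [PySem.List.length_enumerate] using h2
  rw [List.getElem_map, List.getElem_map, PySem.List.getElem_enumerate]
  have hslot := pv_slot_items (s0 :: rest) s0 jn hjn hLen
    (fun s hs => (pv_shape_facts s s0 (hShapes s hs)).2 jn hjn)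
  have hjf : jn < (((s0 :: rest).map pvIterate).flatten.foldl (fun prod t =>
      prod.set t.1.toNat
        ((prod.getD t.1.toNat PySem.Dict.empty).modify t.2.1 [] (fun l => l ++ [t.2.2])))
    (pvMapOver (fun _ => []) s0)).length := by
    rw [pv_fold_length]
    simpa [pvMapOver] using hjn
  rw [List.getD_eq_getElem?_getD, List.getElem?_eq_getElem hjf, Option.getD_some] at hslot
  refine hslot.trans ?_
  have e0 : s0.getD jn [] = s0[jn] := by
    rw [List.getD_eq_getElem?_getD, List.getElem?_eq_getElem hjn]; rfl
  simp only [e0, zero_add, PySem.List.pyGetD_natCast]
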